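-- pv_equiv track=rewrite | github.com/JoelDankert/Abi-Strafen | checker.py | scan_field
-- ===== SOURCE A (Python) =====
-- from typing import List, Tuple
--
-- def scan_field(s: str, allowed: set, allow_minus: bool) -> Tuple[bool, List[str], List[str]]:
--     """
--     Läuft zeichenweise durch den String und liefert:
--         missing_space  : True/False
--         invalid_tokens : Liste unzulässiger Tokens
--         tokens         : Liste erkannter Tokens
--     """
--     i, n = 0, len(s)
--     miss_space = False
--     tokens, invalid = [], []
--
--     while i < n:
--         if s[i].isspace():
--             i += 1
--             continue
--
--         # möglicher Tokenbeginn --------------------------------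
--         if s[i] == "-":
--             if not allow_minus or i + 1 >= n or not s[i + 1].isdigit():
--                 invalid.append("-")
--                 i += 1
--                 continue
--             token = s[i : i + 2]       # z. B. "-3"
--             i += 2
--         elif s[i].isdigit():
--             token = s[i]
--             i += 1
--         else:                          # unerwartetes Zeichen
--             invalid.append(s[i])
--             i += 1
--             continue
--
--         # Token valid?
--         if token not in allowed:
--             invalid.append(token)
--
--         tokens.append(token)
--
--         # Nach dem Token MUSS entweder Ende oder Whitespace kommen
--         if i < n and not s[i].isspace():
--             miss_space = True
--
--     return miss_space, invalid, tokens
-- ===== SOURCE B (Python) =====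
-- import re
--
-- def scan_field(s: str, allowed: set, allow_minus: bool):
--     """Regex tokenizer: pattern matches '-<digit>' pairs (when allow_minus) or any
--     single non-newline char; classify each match instead of stepping an index."""
--     pattern = r'-\d|.' if allow_minus else r'.'
--     miss_space = False
--     tokens, invalid = [], []
--     for m in re.finditer(pattern, s):
--         t = m.group()
--         if len(t) == 1 and t.isspace():
--             continue
--         if len(t) == 2 or t.isdigit():
--             if t not in allowed:
--                 invalid.append(t)
--             tokens.append(t)
--             if m.end() < len(s) and not s[m.end()].isspace():
--                 miss_space = True
--         else:
--             invalid.append(t)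
--     return miss_space, invalid, tokens
-- ===== Notes on version B (the rewrite author's own statement) =====
-- stated objective: idiomatic
-- what changed: Replaced the manual index-stepping while loop with a regex tokenizer: re.finditer on r'-\d|.' (or r'.' without minus) produces the match stream, and a single classification per match replaces the hand-managed index/lookahead bookkeeping.
import Mathlib
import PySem

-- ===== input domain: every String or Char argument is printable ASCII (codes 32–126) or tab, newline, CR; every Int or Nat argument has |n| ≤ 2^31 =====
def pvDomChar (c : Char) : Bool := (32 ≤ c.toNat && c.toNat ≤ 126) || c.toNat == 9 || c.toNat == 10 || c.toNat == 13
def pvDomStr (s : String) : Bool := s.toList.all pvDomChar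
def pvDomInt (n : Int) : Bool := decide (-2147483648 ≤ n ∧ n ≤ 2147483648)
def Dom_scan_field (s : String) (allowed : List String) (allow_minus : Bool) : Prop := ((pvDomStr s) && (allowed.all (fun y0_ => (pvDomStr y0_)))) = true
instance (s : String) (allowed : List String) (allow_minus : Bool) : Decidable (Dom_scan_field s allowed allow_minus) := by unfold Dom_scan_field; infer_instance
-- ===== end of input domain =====

-- B replaces A's manual index loop by a regex tokenizer (re.finditer over r'-\d|.') with
-- one classification step per match; objective: more idiomatic, same O(n) cost.

-- ===== PORT A =====
-- A's while loop reads s[i] / s[i+1] and advances i by 1 or 2; ported as recursion on the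
-- suffix s[i:] (as List Char) carrying the accumulators (miss_space, invalid, tokens).
def scanFieldLoopA (allowed : List String) (allow_minus : Bool) :
    List Char → Bool → List String → List String → Bool × List String × List String
  | [], miss, invalid, tokens => (miss, invalid, tokens)
  | [c], miss, invalid, tokens =>      -- last char: i + 1 >= n and the token, if any, ends the string
    if PySem.Chars.isspace c then
      scanFieldLoopA allowed allow_minus [] miss invalid tokens
    else if c = '-' then               -- i + 1 >= n: invalid "-"
      scanFieldLoopA allowed allow_minus [] miss (invalid ++ ["-"]) tokens
    else if PySem.Chars.isdigit c then
      scanFieldLoopA allowed allow_minus [] miss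
        (if allowed.contains (String.ofList [c]) then invalid else invalid ++ [String.ofList [c]])
        (tokens ++ [String.ofList [c]])
    else
      scanFieldLoopA allowed allow_minus [] miss (invalid ++ [String.ofList [c]]) tokens
  | c :: d :: rest', miss, invalid, tokens =>    -- s[i+1] exists and is d
    if PySem.Chars.isspace c then
      scanFieldLoopA allowed allow_minus (d :: rest') miss invalid tokens
    else if c = '-' then
      if !allow_minus || !(PySem.Chars.isdigit d) then
        scanFieldLoopA allowed allow_minus (d :: rest') miss (invalid ++ ["-"]) tokens
      else
        -- token = s[i:i+2], i += 2
        scanFieldLoopA allowed allow_minus rest'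
          (match rest' with
            | [] => miss
            | e :: _ => if PySem.Chars.isspace e then miss else true)
          (if allowed.contains (String.ofList [c, d]) then invalid else invalid ++ [String.ofList [c, d]])
          (tokens ++ [String.ofList [c, d]])
    else if PySem.Chars.isdigit c then
      scanFieldLoopA allowed allow_minus (d :: rest')
        (if PySem.Chars.isspace d then miss else true)
        (if allowed.contains (String.ofList [c]) then invalid else invalid ++ [String.ofList [c]])
        (tokens ++ [String.ofList [c]])
    else
      scanFieldLoopA allowed allow_minus (d :: rest') miss (invalid ++ [String.ofList [c]]) tokens

def scan_field (s : String) (allowed : List String) (allow_minus : Bool) : Bool × List String × List String :=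
  scanFieldLoopA allowed allow_minus s.toList false [] []

-- ===== PORT B =====
-- re.finditer(r'-\d|.', s) (resp. r'.'): each match, left to right, is '-<digit>' when the
-- alternative applies, else any single char except '\n' (which '.' never matches and finditer
-- skips). A match is (matched text, suffix of s after the match) — the suffix's head is s[m.end()].
def scanFieldMatchesB (allow_minus : Bool) : List Char → List (String × List Char)
  | [] => []
  | [c] =>
    if c = '\n' then [] else [(String.ofList [c], [])]
  | c :: d :: rest' =>
    if c = '\n' then scanFieldMatchesB allow_minus (d :: rest')
    else if allow_minus && c = '-' && PySem.Chars.isdigit d then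
      (String.ofList [c, d], rest') :: scanFieldMatchesB allow_minus rest'
    else
      (String.ofList [c], d :: rest') :: scanFieldMatchesB allow_minus (d :: rest')

-- the body of B's for-loop: classify one match
def scanFieldStepB (allowed : List String) (st : Bool × List String × List String)
    (m : String × List Char) : Bool × List String × List String :=
  let t := m.1
  if PySem.Str.len t == 1 && PySem.Str.strIsspace t then st
  else if PySem.Str.len t == 2 || PySem.Str.strIsdigit t then
    let invalid' := if allowed.contains t then st.2.1 else st.2.1 ++ [t]
    let miss' := match m.2 with   -- m.end() < len(s) and not s[m.end()].isspace()
      | [] => st.1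
      | e :: _ => if PySem.Chars.isspace e then st.1 else true
    (miss', invalid', st.2.2 ++ [t])
  else (st.1, st.2.1 ++ [t], st.2.2)

def scan_field_alt (s : String) (allowed : List String) (allow_minus : Bool) : Bool × List String × List String :=
  (scanFieldMatchesB allow_minus s.toList).foldl (scanFieldStepB allowed) (false, [], [])

-- ===== PRECONDITION & SPEC =====
def Spec_scan_field (s : String) (allowed : List String) (allow_minus : Bool) (out : Bool × List String × List String) : Prop := out = scan_field_alt s allowed allow_minus
instance (s : String) (allowed : List String) (allow_minus : Bool) (out : Bool × List String × List String) : Decidable (Spec_scan_field s allowed allow_minus out) := by unfold Spec_scan_field; infer_instance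

-- ===== CLAIM (what is proved, stated in full; the proofs are below) =====
def Claim_equal_scan_field : Prop := ∀ (s : String) (allowed : List String) (allow_minus : Bool), Dom_scan_field s allowed allow_minus → Spec_scan_field s allowed allow_minus (scan_field s allowed allow_minus)

-- ===== LEMMAS AND PROOFS =====

lemma scan_field_loop_eq (allowed : List String) (allow_minus : Bool) (l : List Char)
    (miss : Bool) (invalid tokens : List String) :
    scanFieldLoopA allowed allow_minus l miss invalid tokens =
      (scanFieldMatchesB allow_minus l).foldl (scanFieldStepB allowed) (miss, invalid, tokens) := by
  fun_induction scanFieldLoopA allowed allow_minus l miss invalid tokens <;>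
    simp_all [scanFieldMatchesB, scanFieldStepB, PySem.Str.len, PySem.Str.strIsspace,
      PySem.Str.strIsdigit, PySem.Chars.strIsspace, PySem.Chars.strIsdigit] <;>
    first
      | decide
      | (split_ifs <;>
          simp_all [scanFieldStepB, PySem.Str.len, PySem.Str.strIsspace, PySem.Str.strIsdigit,
            PySem.Chars.strIsspace, PySem.Chars.strIsdigit,
            show PySem.Chars.isspace '\n' = true from by decide,
            show PySem.Chars.isspace '-' = false from by decide,
            show PySem.Chars.isdigit '-' = false from by decide])

-- ===== VERDICT (by name: the statement is the Claim_ definition above) =====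
theorem scan_field_spec : Claim_equal_scan_field := by
  intro s allowed allow_minus _
  show scan_field s allowed allow_minus = scan_field_alt s allowed allow_minus
  simp [scan_field, scan_field_alt, scan_field_loop_eq]
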